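-- pv_equiv track=rewrite | github.com/VorAMagna/FSW_TestAutomation | Excel_To_MKS_Doc/ImExcelExporter.py | order_export_list_get_subelements
-- ===== SOURCE A (Python) =====
-- EXPORT_HEADER_ELEMENT_DELIMITER = "Functional"
--
-- EXPORT_HEADER_LIST_KEYVAL = 'Requirements type'
--
-- def order_export_list_get_subelements(
--                                       continuation_list) -> int and list:
--     """Gets all the sublelements of a header
--     :param continuation_list: the list after the header"""
--     offset = 0
--     subelement_list = list()
--     for continuation_list_element in continuation_list:
--         if continuation_list_element[EXPORT_HEADER_LIST_KEYVAL] \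
--                 == EXPORT_HEADER_ELEMENT_DELIMITER:
--             offset += 1
--             subelement_list.append(continuation_list_element)
--         else:
--             break
--     return offset, subelement_list
-- ===== SOURCE B (Python) =====
-- EXPORT_HEADER_ELEMENT_DELIMITER = "Functional"
--
-- EXPORT_HEADER_LIST_KEYVAL = 'Requirements type'
--
-- def order_export_list_get_subelements(continuation_list) -> int and list:
--     """Gets all the sublelements of a header (recursive decomposition).
--     :param continuation_list: the list after the header"""
--     if continuation_list and \
--             continuation_list[0][EXPORT_HEADER_LIST_KEYVAL] \
--             == EXPORT_HEADER_ELEMENT_DELIMITER: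
--         offset, rest = order_export_list_get_subelements(continuation_list[1:])
--         return offset + 1, [continuation_list[0]] + rest
--     return 0, []
-- ===== Notes on version B (the rewrite author's own statement) =====
-- stated objective: alternative
-- what changed: Replaces the explicit loop with break and a manual offset counter by a structural recursion that extracts the matching prefix and derives the offset from the recursive result.
import Mathlib
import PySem

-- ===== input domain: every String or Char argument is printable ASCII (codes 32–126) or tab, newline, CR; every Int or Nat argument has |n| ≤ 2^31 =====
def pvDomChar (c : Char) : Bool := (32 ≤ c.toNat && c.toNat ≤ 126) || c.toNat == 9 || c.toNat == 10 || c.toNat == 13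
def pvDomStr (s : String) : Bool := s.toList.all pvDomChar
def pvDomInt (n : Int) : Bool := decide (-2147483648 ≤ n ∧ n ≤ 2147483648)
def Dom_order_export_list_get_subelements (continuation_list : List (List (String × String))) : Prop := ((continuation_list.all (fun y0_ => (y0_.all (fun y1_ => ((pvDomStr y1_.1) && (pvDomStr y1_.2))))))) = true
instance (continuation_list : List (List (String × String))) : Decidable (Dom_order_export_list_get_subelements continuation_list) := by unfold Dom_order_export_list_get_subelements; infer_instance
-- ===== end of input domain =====

-- B replaces A's explicit loop/break/counter by a structural recursion; equivalence on inputs where A raises no KeyError.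
-- ===== PORT A =====
-- dict lookup d[k] (first match in the association list); none = KeyError
def pvLookup (d : List (String × String)) (k : String) : Option String :=
  (d.find? (fun p => p.1 == k)).map (·.2)

-- A's for-loop with break, carried state (offset, subelement_list); on a missing key
-- Python raises (excluded by Pre_), here the loop breaks.
def goA : List (List (String × String)) → Int → List (List (String × String)) → Int × (List (List (String × String)))
  | [], offset, acc => (offset, acc)
  | x :: rest, offset, acc =>
    if pvLookup x "Requirements type" = some "Functional" then
      goA rest (offset + 1) (acc ++ [x])
    else (offset, acc)

def order_export_list_get_subelements (continuation_list : List (List (String × String))) : Int × (List (List (String × String))) :=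
  goA continuation_list 0 []

-- ===== PORT B =====
def order_export_list_get_subelements_alt (continuation_list : List (List (String × String))) : Int × (List (List (String × String))) :=
  match continuation_list with
  | [] => (0, [])
  | x :: rest =>
    if pvLookup x "Requirements type" = some "Functional" then
      let r := order_export_list_get_subelements_alt rest
      (r.1 + 1, x :: r.2)
    else (0, [])

-- ===== PRECONDITION & SPEC =====
-- Pre_ excludes exactly the inputs on which Python A raises KeyError: some element is
-- reached by the scan (every earlier element maps the key to the delimiter) yet lacks the key.
def Pre_order_export_list_get_subelements (continuation_list : List (List (String × String))) : Prop :=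
  ∀ i, i < continuation_list.length →
    (∀ j, j < i → pvLookup (continuation_list.getD j []) "Requirements type" = some "Functional") →
    (pvLookup (continuation_list.getD i []) "Requirements type").isSome = true
instance (continuation_list : List (List (String × String))) : Decidable (Pre_order_export_list_get_subelements continuation_list) := by unfold Pre_order_export_list_get_subelements; infer_instance

def pvWitness_order_export_list_get_subelements : (List (List (String × String))) :=
  [[("Requirements type", "Functional")], [("Requirements type", "Usability")], [("other", "x")]]

def Spec_order_export_list_get_subelements (continuation_list : List (List (String × String))) (out : Int × (List (List (String × String)))) : Prop := out = order_export_list_get_subelements_alt continuation_list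
instance (continuation_list : List (List (String × String))) (out : Int × (List (List (String × String)))) : Decidable (Spec_order_export_list_get_subelements continuation_list out) := by unfold Spec_order_export_list_get_subelements; infer_instance

-- ===== CLAIM (what is proved, stated in full; the proofs are below) =====
def Claim_equal_order_export_list_get_subelements : Prop := ∀ (continuation_list : List (List (String × String))), Dom_order_export_list_get_subelements continuation_list → Pre_order_export_list_get_subelements continuation_list → Spec_order_export_list_get_subelements continuation_list (order_export_list_get_subelements continuation_list)

-- ===== LEMMAS AND PROOFS =====
-- loop invariant: A's loop equals B's recursive result shifted by the carried state
theorem goA_eq_alt (xs : List (List (String × String))) :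
    ∀ (offset : Int) (acc : List (List (String × String))),
      goA xs offset acc
        = (offset + (order_export_list_get_subelements_alt xs).1,
           acc ++ (order_export_list_get_subelements_alt xs).2) := by
  induction xs with
  | nil => intro offset acc; simp [goA, order_export_list_get_subelements_alt]
  | cons x rest ih =>
    intro offset acc
    by_cases h : pvLookup x "Requirements type" = some "Functional"
    · simp [goA, order_export_list_get_subelements_alt, h, ih]
      omega
    · simp [goA, order_export_list_get_subelements_alt, h]

-- ===== VERDICT (by name: the statement is the Claim_ definition above) =====
theorem order_export_list_get_subelements_spec : Claim_equal_order_export_list_get_subelements := by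
  intro continuation_list _ _
  unfold Spec_order_export_list_get_subelements order_export_list_get_subelements
  simp [goA_eq_alt]
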